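-- pv_equiv track=rewrite | github.com/DavidMCKim/TIL2 | 20230712/programmers/문자열나누기.py | solution
-- ===== SOURCE A (Python) =====
-- def solution(s):
--     answer = 0
--     cnt1 = 0
--     cnt2 = 0
--     str = ""
--     for i in s:
--         if cnt1 == cnt2:
--             cnt1 +=1
--             x = i
--             answer +=1
--         elif i == x:
--             cnt1 +=1
--         else:
--             cnt2 +=1
--     return answer
-- ===== SOURCE B (Python) =====
-- def solution(s):
--     count = 0
--     t = s
--     while t:
--         pivot = t[0]
--         same, diff = 1, 0
--         t = t[1:]
--         while t and same != diff:
--             if t[0] == pivot: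
--                 same += 1
--             else:
--                 diff += 1
--             t = t[1:]
--         count += 1
--     return count
-- ===== Notes on version B (the rewrite author's own statement) =====
-- stated objective: alternative
-- what changed: Replaced A's single pass that threads cnt1/cnt2 and the pivot across the whole string with an outer loop over segments: take the first remaining char as pivot, run an inner scan counting matches vs non-matches until they balance or the string ends, count one segment and drop the consumed prefix.
import Mathlib
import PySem

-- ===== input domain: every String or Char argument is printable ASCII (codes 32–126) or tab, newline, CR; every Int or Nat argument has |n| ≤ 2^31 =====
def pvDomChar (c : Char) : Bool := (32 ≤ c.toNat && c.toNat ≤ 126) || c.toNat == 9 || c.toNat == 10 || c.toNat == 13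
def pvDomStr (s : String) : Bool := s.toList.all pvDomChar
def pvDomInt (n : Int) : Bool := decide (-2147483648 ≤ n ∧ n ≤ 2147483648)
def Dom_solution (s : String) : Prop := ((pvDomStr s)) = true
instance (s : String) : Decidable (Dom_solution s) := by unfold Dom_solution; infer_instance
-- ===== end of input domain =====

-- B replaces A's single pass carrying cnt1/cnt2 across the whole string by an outer
-- loop over segments with an inner balance scan per segment (objective: alternative,
-- same cost, clearer segment structure).

-- ===== PORT A =====
-- One step of A's for-loop on state (answer, cnt1, cnt2, x); Python's `x` before its
-- first assignment is never read (first iteration has cnt1 == cnt2), so the initial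
-- ' ' is an unread placeholder.
def stepA (st : Int × Int × Int × Char) (i : Char) : Int × Int × Int × Char :=
  if st.2.1 = st.2.2.1 then (st.1 + 1, st.2.1 + 1, st.2.2.1, i)
  else if i = st.2.2.2 then (st.1, st.2.1 + 1, st.2.2.1, st.2.2.2)
  else (st.1, st.2.1, st.2.2.1 + 1, st.2.2.2)

def solution (s : String) : Int :=
  (s.toList.foldl stepA (0, 0, 0, ' ')).1

-- ===== PORT B =====
-- Inner while loop of B: consume chars, counting matches of the pivot vs others,
-- stop as soon as the counts balance; returns the unconsumed remainder.
def segRest (p : Char) (same diff : Int) : List Char → List Char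
  | [] => []
  | c :: rest =>
    if c = p then
      if same + 1 = diff then rest else segRest p (same + 1) diff rest
    else
      if same = diff + 1 then rest else segRest p same (diff + 1) rest

theorem segRest_length_le (p : Char) (s d : Int) (l : List Char) :
    (segRest p s d l).length ≤ l.length := by
  induction l generalizing s d with
  | nil => simp [segRest]
  | cons c rest ih =>
    simp only [segRest]
    split
    · split
      · simp
      · exact le_trans (ih _ _) (Nat.le_succ _)
    · split
      · simp
      · exact le_trans (ih _ _) (Nat.le_succ _)

-- Outer while loop of B over segments.
def goB : List Char → Int
  | [] => 0
  | c :: rest => 1 + goB (segRest c 1 0 rest)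
termination_by l => l.length
decreasing_by
  exact Nat.lt_succ_of_le (segRest_length_le c 1 0 rest)

def solution_alt (s : String) : Int := goB s.toList

-- ===== PRECONDITION & SPEC =====
def Spec_solution (s : String) (out : Int) : Prop := out = solution_alt s
instance (s : String) (out : Int) : Decidable (Spec_solution s out) := by unfold Spec_solution; infer_instance

-- ===== CLAIM (what is proved, stated in full; the proofs are below) =====
def Claim_equal_solution : Prop := ∀ (s : String), Dom_solution s → Spec_solution s (solution s)

-- ===== LEMMAS AND PROOFS =====

-- segRest depends on its two counters only through their difference.
theorem segRest_shift (p : Char) (l : List Char) :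
    ∀ (s d k : Int), segRest p (s + k) (d + k) l = segRest p s d l := by
  induction l with
  | nil => intro s d k; simp [segRest]
  | cons c rest ih =>
    intro s d k
    by_cases hc : c = p
    · simp only [segRest, if_pos hc]
      by_cases he : s + 1 = d
      · rw [if_pos he, if_pos (show s + k + 1 = d + k by omega)]
      · rw [if_neg he, if_neg (show ¬(s + k + 1 = d + k) by omega),
            show s + k + 1 = s + 1 + k by ring]
        exact ih (s + 1) d k
    · simp only [segRest, if_neg hc]
      by_cases he : s = d + 1
      · rw [if_pos he, if_pos (show s + k = d + k + 1 by omega)]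
      · rw [if_neg he, if_neg (show ¬(s + k = d + k + 1) by omega),
            show d + k + 1 = d + 1 + k by ring]
        exact ih s (d + 1) k

-- Main invariant, by strong induction on the length of the remaining input:
-- (1) mid-segment (cnt1 > cnt2): A's remaining fold yields ans + B's count of what
--     remains after the current segment balances;
-- (2) at a segment boundary (cnt1 = cnt2): A's remaining fold yields ans + B's count.
theorem mainInv : ∀ (n : Nat) (l : List Char), l.length ≤ n →
    ((∀ (ans s d : Int) (x : Char), d < s →
        (List.foldl stepA (ans, s, d, x) l).1 = ans + goB (segRest x s d l)) ∧
     (∀ (ans t : Int) (x : Char),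
        (List.foldl stepA (ans, t, t, x) l).1 = ans + goB l)) := by
  intro n
  induction n with
  | zero =>
    intro l hl
    have : l = [] := List.eq_nil_of_length_eq_zero (Nat.le_zero.mp hl)
    subst this
    exact ⟨fun ans s d x _ => by simp [segRest, goB], fun ans t x => by simp [goB]⟩
  | succ n ih =>
    intro l hl
    cases l with
    | nil =>
      exact ⟨fun ans s d x _ => by simp [segRest, goB], fun ans t x => by simp [goB]⟩
    | cons c rest =>
      have hrest : rest.length ≤ n := by simpa using Nat.succ_le_succ_iff.mp hl
      constructor
      · intro ans s d x hds
        have hne : s ≠ d := by omega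
        by_cases hc : c = x
        · -- match: segment continues with counts (s+1, d)
          have hstep : stepA (ans, s, d, x) c = (ans, s + 1, d, x) := by
            simp [stepA, hne, hc]
          have hne2 : s + 1 ≠ d := by omega
          have hseg : segRest x s d (c :: rest) = segRest x (s + 1) d rest := by
            simp [segRest, hc, hne2]
          rw [List.foldl_cons, hstep, hseg]
          exact (ih rest hrest).1 ans (s + 1) d x (by omega)
        · -- mismatch: counts become (s, d+1)
          have hstep : stepA (ans, s, d, x) c = (ans, s, d + 1, x) := by
            simp [stepA, hne, hc]
          by_cases hb : s = d + 1
          · -- segment balances here: B drops to rest, A is at a boundary state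
            have hseg : segRest x s d (c :: rest) = rest := by
              simp [segRest, hc, hb]
            rw [List.foldl_cons, hstep, hseg, hb]
            exact (ih rest hrest).2 ans (d + 1) x
          · have hseg : segRest x s d (c :: rest) = segRest x s (d + 1) rest := by
              simp [segRest, hc, hb]
            rw [List.foldl_cons, hstep, hseg]
            exact (ih rest hrest).1 ans s (d + 1) x (by omega)
      · intro ans t x
        have hstep : stepA (ans, t, t, x) c = (ans + 1, t + 1, t, c) := by
          simp [stepA]
        rw [List.foldl_cons, hstep]
        have h1 := (ih rest hrest).1 (ans + 1) (t + 1) t c (by omega)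
        have hshift : segRest c (t + 1) t rest = segRest c 1 0 rest := by
          have := segRest_shift c rest 1 0 t
          simpa [add_comm] using this
        rw [h1, hshift]
        show ans + 1 + goB (segRest c 1 0 rest) = ans + goB (c :: rest)
        rw [goB]
        ring

-- ===== VERDICT (by name: the statement is the Claim_ definition above) =====
theorem solution_spec : Claim_equal_solution := by
  intro s _
  unfold Spec_solution solution solution_alt
  have h := (mainInv s.toList.length s.toList le_rfl).2 0 0 ' '
  simpa using h
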